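-- pv_equiv track=rewrite | github.com/phoenix7782/Project-Euler | 5/main.py | factors_missing
-- ===== SOURCE A (Python) =====
-- def factors_missing(factors, test):
-- 	"""
-- 		Given factors and test, makes sure all
-- 		elements of test are represented in factors,
-- 		including repeats. Returns a tuple of elements
-- 		not found
-- 	"""
-- 	ret = []
-- 	i = 0
-- 	for factor in test:
-- 		try:
-- 			i = factors.index(factor, i) + 1
-- 		except ValueError:
-- 			ret.append(factor)
-- 	return tuple(ret)
-- ===== SOURCE B (Python) =====
-- def factors_missing(factors, test):
--     """Greedy subsequence match: one index pass builds value -> ascending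
--     position lists, then each test element advances a per-value cursor
--     instead of rescanning factors."""
--     pos = {}
--     for j in range(len(factors)):
--         pos.setdefault(factors[j], []).append(j)
--     ptr = {}
--     ret = []
--     i = 0
--     for factor in test:
--         lst = pos.get(factor)
--         if lst is None:
--             ret.append(factor)
--             continue
--         k = ptr.get(factor, 0)
--         while k < len(lst) and lst[k] < i:
--             k += 1
--         if k < len(lst):
--             i = lst[k] + 1
--             ptr[factor] = k + 1
--         else:
--             ptr[factor] = k
--             ret.append(factor)
--     return tuple(ret)
-- ===== Notes on version B (the rewrite author's own statement) =====
-- stated objective: faster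
-- what changed: Instead of rescanning factors with factors.index(factor, i) for every test element, B builds a value->ascending-positions index in one pass and answers each query by advancing a per-value cursor past already-passed positions, so each factors position is skipped at most once overall.
import Mathlib
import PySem

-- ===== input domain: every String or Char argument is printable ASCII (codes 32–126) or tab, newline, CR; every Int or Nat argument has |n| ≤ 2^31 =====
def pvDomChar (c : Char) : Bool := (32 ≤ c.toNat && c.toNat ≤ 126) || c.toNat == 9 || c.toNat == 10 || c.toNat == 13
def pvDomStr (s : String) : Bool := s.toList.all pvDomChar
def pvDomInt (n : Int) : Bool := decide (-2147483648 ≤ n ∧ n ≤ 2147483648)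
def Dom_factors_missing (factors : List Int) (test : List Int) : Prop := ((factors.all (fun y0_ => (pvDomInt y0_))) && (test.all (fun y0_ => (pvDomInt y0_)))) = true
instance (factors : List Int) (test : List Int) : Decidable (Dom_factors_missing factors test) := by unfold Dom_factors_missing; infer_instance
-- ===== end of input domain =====

-- B replaces A's repeated factors.index scans by a one-pass value→positions index with
-- per-value cursors (objective: faster).

-- ===== PORT A =====
-- factors.index(factor, i): first index j ≥ i with factors[j] = factor; none = ValueError.
-- (A's i is an int that is always ≥ 0, so a Nat counter is exact.)
def pyIndexFrom (xs : List Int) (v : Int) (j : Nat) : Option Nat :=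
  match xs with
  | [] => none
  | y :: ys => if y = v then some j else pyIndexFrom ys v (j + 1)

def aStep (factors : List Int) (s : List Int × Nat) (factor : Int) : List Int × Nat :=
  match pyIndexFrom (factors.drop s.2) factor s.2 with
  | some j => (s.1, j + 1)
  | none => (s.1 ++ [factor], s.2)

def factors_missing (factors : List Int) (test : List Int) : List Int :=
  (test.foldl (aStep factors) ([], 0)).1

-- ===== PORT B =====
-- pos.setdefault(factors[j], []).append(j) is Dict.modify with default [];
-- the loop indices of range(len(factors)) are 0..n-1, so List.range is exact here.
def posMap (factors : List Int) : PySem.Dict Int (List Nat) :=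
  (List.range factors.length).foldl
    (fun d j => d.modify (factors.getD j 0) [] (fun l => l ++ [j])) PySem.Dict.empty

-- while k < len(lst) and lst[k] < i: k += 1
def skipLt (lst : List Nat) (i : Nat) (k : Nat) : Nat :=
  if h : k < lst.length then
    if lst[k] < i then skipLt lst i (k + 1) else k
  else k
termination_by lst.length - k

def bStep (pos : PySem.Dict Int (List Nat)) (s : List Int × Nat × PySem.Dict Int Nat)
    (factor : Int) : List Int × Nat × PySem.Dict Int Nat :=
  match pos.get? factor with
  | none => (s.1 ++ [factor], s.2.1, s.2.2)
  | some lst =>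
    let k' := skipLt lst s.2.1 (s.2.2.getD factor 0)
    if h : k' < lst.length then (s.1, lst[k'] + 1, s.2.2.insert factor (k' + 1))
    else (s.1 ++ [factor], s.2.1, s.2.2.insert factor k')

def factors_missing_alt (factors : List Int) (test : List Int) : List Int :=
  (test.foldl (bStep (posMap factors)) ([], 0, PySem.Dict.empty)).1

-- ===== PRECONDITION & SPEC =====
def Spec_factors_missing (factors : List Int) (test : List Int) (out : List Int) : Prop := out = factors_missing_alt factors test
instance (factors : List Int) (test : List Int) (out : List Int) : Decidable (Spec_factors_missing factors test out) := by unfold Spec_factors_missing; infer_instance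

-- ===== CLAIM (what is proved, stated in full; the proofs are below) =====
def Claim_equal_factors_missing : Prop := ∀ (factors : List Int) (test : List Int), Dom_factors_missing factors test → Spec_factors_missing factors test (factors_missing factors test)

-- ===== LEMMAS AND PROOFS =====

-- the ascending list of positions of v in factors
def pvOccs (factors : List Int) (v : Int) : List Nat :=
  (List.range factors.length).filter (fun j => factors.getD j 0 == v)

theorem posMap_getD_aux (key : Nat → Int) (l : List Nat) (d : PySem.Dict Int (List Nat))
    (v : Int) :
    (l.foldl (fun d j => d.modify (key j) [] (fun l => l ++ [j])) d).getD v []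
      = d.getD v [] ++ l.filter (fun j => key j == v) := by
  induction l generalizing d with
  | nil => simp
  | cons a l ih =>
    simp only [List.foldl_cons, List.filter_cons, ih]
    by_cases h : key a = v
    · simp [h]
    · simp [PySem.Dict.getD_modify, h, Ne.symm h]

theorem posMap_getD (factors : List Int) (v : Int) :
    (posMap factors).getD v [] = pvOccs factors v := by
  simpa [posMap, pvOccs, PySem.Dict.getD_empty] using
    posMap_getD_aux (fun j => factors.getD j 0) (List.range factors.length) PySem.Dict.empty v

theorem posMap_get?_none (factors : List Int) (v : Int)
    (h : (posMap factors).get? v = none) : pvOccs factors v = [] := by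
  rw [PySem.Dict.get?_eq_none_iff_not_mem_keys] at h
  rw [posMap, PySem.Dict.keys_foldl_modify_key (List.range factors.length)
      (fun j => factors.getD j 0) [] (fun _ j l => l ++ [j])] at h
  simp only [PySem.Dict.keys_empty, PySem.Set.mem_update, List.mem_map] at h
  push Not at h
  rw [pvOccs, List.filter_eq_nil_iff]
  intro a ha
  simpa using h.2 a ha

theorem pyIndexFrom_eq (factors : List Int) (v : Int) :
    ∀ (d i : Nat), factors.length - i = d → i ≤ factors.length →
    pyIndexFrom (factors.drop i) v i
      = ((List.range' i (factors.length - i)).filter (fun j => factors.getD j 0 == v)).head? := by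
  intro d
  induction d with
  | zero =>
    intro i hd hle
    have hi : factors.length ≤ i := by omega
    rw [List.drop_eq_nil_of_le hi, hd]
    simp [pyIndexFrom]
  | succ d ih =>
    intro i hd hle
    have hi : i < factors.length := by omega
    have hget : factors.getD i 0 = factors[i] := List.getD_eq_getElem factors 0 hi
    rw [List.drop_eq_getElem_cons hi, hd, List.range'_succ, List.filter_cons, hget,
        pyIndexFrom]
    by_cases h : factors[i] = v
    · rw [if_pos h, if_pos (by simpa using h)]
      rfl
    · rw [if_neg h, if_neg (by simpa using h)]
      have h2 : factors.length - (i + 1) = d := by omega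
      rw [ih (i + 1) h2 (by omega), h2]

theorem dropWhile_of_ge (i : Nat) : ∀ (l : List Nat), (∀ x ∈ l, i ≤ x) →
    l.dropWhile (fun m => decide (m < i)) = l := by
  intro l hl
  cases l with
  | nil => rfl
  | cons a l =>
    have : ¬ a < i := by have := hl a (by simp); omega
    simp [this]

theorem dropWhile_occs (factors : List Int) (v : Int) (i : Nat) (hle : i ≤ factors.length) :
    (pvOccs factors v).dropWhile (fun m => decide (m < i))
      = (List.range' i (factors.length - i)).filter (fun j => factors.getD j 0 == v) := by
  have hsplit : List.range factors.length
      = List.range' 0 i ++ List.range' i (factors.length - i) := by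
    rw [List.range_eq_range']
    have := @List.range'_append 0 i (factors.length - i) 1
    simp only [one_mul, Nat.zero_add] at this
    rw [this]; congr 1; omega
  rw [pvOccs, hsplit, List.filter_append, List.dropWhile_append]
  have h1 : (List.filter (fun j => factors.getD j 0 == v) (List.range' 0 i)).dropWhile
      (fun m => decide (m < i)) = [] := by
    rw [List.dropWhile_eq_nil_iff]
    intro x hx
    have := (List.mem_filter.mp hx).1
    rw [List.mem_range'] at this
    obtain ⟨k, hk, rfl⟩ := this
    simp; omega
  rw [h1]
  simp only [List.isEmpty_nil, if_true]
  apply dropWhile_of_ge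
  intro x hx
  have := (List.mem_filter.mp hx).1
  rw [List.mem_range'] at this
  obtain ⟨k, hk, rfl⟩ := this
  omega

theorem skipLt_spec (lst : List Nat) (i : Nat) : ∀ (k : Nat),
    k ≤ skipLt lst i k ∧
    (∀ m (h : m < lst.length), k ≤ m → m < skipLt lst i k → lst[m] < i) ∧
    (∀ h : skipLt lst i k < lst.length, ¬ lst[skipLt lst i k] < i) := by
  intro k
  induction k using skipLt.induct lst i with
  | case1 x h hlt ih =>
    have hrw : skipLt lst i x = skipLt lst i (x + 1) := by
      rw [skipLt, dif_pos h, if_pos hlt]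
    rw [hrw]
    refine ⟨by have := ih.1; omega, ?_, ih.2.2⟩
    intro m hm hxm hms
    rcases Nat.eq_or_lt_of_le hxm with rfl | hlt'
    · exact hlt
    · exact ih.2.1 m hm hlt' hms
  | case2 x h hlt =>
    have hrw : skipLt lst i x = x := by rw [skipLt, dif_pos h, if_neg hlt]
    rw [hrw]
    exact ⟨le_refl _, by omega, fun _ => hlt⟩
  | case3 x h =>
    have hrw : skipLt lst i x = x := by rw [skipLt, dif_neg h]
    rw [hrw]
    exact ⟨le_refl _, by omega, fun hc => absurd hc h⟩

theorem dropWhile_eq_drop (p : Nat → Bool) : ∀ (L : List Nat) (k : Nat),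
    (∀ m (h : m < L.length), m < k → p L[m] = true) →
    (∀ h : k < L.length, p L[k] = false) →
    L.dropWhile p = L.drop k := by
  intro L
  induction L with
  | nil => simp
  | cons a L ih =>
    intro k h1 h2
    cases k with
    | zero =>
      have : p a = false := h2 (by simp)
      simp [this]
    | succ k =>
      have ha : p a = true := h1 0 (by simp) (by omega)
      rw [List.dropWhile_cons, if_pos ha, List.drop_succ_cons]
      exact ih k (fun m hm hmk => h1 (m + 1) (by simpa) (by omega))
        (fun h => h2 (by simpa))

-- occurrence positions are genuine indices of factors
theorem pvOccs_lt (factors : List Int) (v : Int) {x : Nat} (hx : x ∈ pvOccs factors v) :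
    x < factors.length := by
  have := (List.mem_filter.mp hx).1
  simpa [List.mem_range] using this

theorem main_inv (factors : List Int) : ∀ (test ret : List Int) (i : Nat)
    (ptr : PySem.Dict Int Nat),
    i ≤ factors.length →
    (∀ v m (h : m < (pvOccs factors v).length), m < ptr.getD v 0 → (pvOccs factors v)[m] < i) →
    (test.foldl (aStep factors) (ret, i)).1
      = (test.foldl (bStep (posMap factors)) (ret, i, ptr)).1 := by
  intro test
  induction test with
  | nil => intro ret i ptr _ _; rfl
  | cons t ts ih =>
    intro ret i ptr hle hinv
    rw [List.foldl_cons, List.foldl_cons]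
    have hIdx : pyIndexFrom (factors.drop i) t i
        = ((pvOccs factors t).dropWhile (fun m => decide (m < i))).head? := by
      rw [pyIndexFrom_eq factors t (factors.length - i) i rfl hle,
          dropWhile_occs factors t i hle]
    cases hP : (posMap factors).get? t with
    | none =>
      have hocc : pvOccs factors t = [] := posMap_get?_none factors t hP
      have hA : aStep factors (ret, i) t = (ret ++ [t], i) := by
        rw [aStep, hIdx, hocc]
        rfl
      have hB : bStep (posMap factors) (ret, i, ptr) t = (ret ++ [t], i, ptr) := by
        simp only [bStep, hP]
      rw [hA, hB]
      exact ih (ret ++ [t]) i ptr hle hinv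
    | some lst =>
      have hlst : lst = pvOccs factors t := by
        have := posMap_getD factors t
        rw [PySem.Dict.getD_eq_get?_getD, hP] at this
        simpa using this
      subst hlst
      obtain ⟨hk0le, hmid, hstop⟩ := skipLt_spec (pvOccs factors t) i (ptr.getD t 0)
      have hall : ∀ m (h : m < (pvOccs factors t).length),
          m < skipLt (pvOccs factors t) i (ptr.getD t 0) →
          (fun m => decide (m < i)) (pvOccs factors t)[m] = true := by
        intro m hm hmk
        simp only [decide_eq_true_eq]
        by_cases hc : m < ptr.getD t 0
        · exact hinv t m hm hc
        · exact hmid m hm (by omega) hmk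
      have hdw : (pvOccs factors t).dropWhile (fun m => decide (m < i))
          = (pvOccs factors t).drop (skipLt (pvOccs factors t) i (ptr.getD t 0)) :=
        dropWhile_eq_drop _ (pvOccs factors t) _ hall (fun h => by simpa using hstop h)
      by_cases hk : skipLt (pvOccs factors t) i (ptr.getD t 0) < (pvOccs factors t).length
      · have hA : aStep factors (ret, i) t
            = (ret, (pvOccs factors t)[skipLt (pvOccs factors t) i (ptr.getD t 0)] + 1) := by
          rw [aStep, hIdx, hdw, List.drop_eq_getElem_cons hk]
          rfl
        have hB : bStep (posMap factors) (ret, i, ptr) t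
            = (ret, (pvOccs factors t)[skipLt (pvOccs factors t) i (ptr.getD t 0)] + 1,
               ptr.insert t (skipLt (pvOccs factors t) i (ptr.getD t 0) + 1)) := by
          simp only [bStep, hP]
          rw [dif_pos hk]
        rw [hA, hB]
        have hmem : (pvOccs factors t)[skipLt (pvOccs factors t) i (ptr.getD t 0)]
            ∈ pvOccs factors t := List.getElem_mem hk
        have hlt : (pvOccs factors t)[skipLt (pvOccs factors t) i (ptr.getD t 0)]
            < factors.length := pvOccs_lt factors t hmem
        have hge : i ≤ (pvOccs factors t)[skipLt (pvOccs factors t) i (ptr.getD t 0)] := by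
          have := hstop hk; omega
        apply ih
        · omega
        · intro v m hm hmp
          by_cases hv : v = t
          · subst hv
            rw [PySem.Dict.getD_insert, if_pos rfl] at hmp
            have hmk : m ≤ skipLt (pvOccs factors v) i (ptr.getD v 0) := by omega
            rcases Nat.eq_or_lt_of_le hmk with rfl | hmk'
            · omega
            · have := hall m hm hmk'
              simp only [decide_eq_true_eq] at this
              omega
          · rw [PySem.Dict.getD_insert, if_neg hv] at hmp
            have := hinv v m hm hmp
            omega
      · have hA : aStep factors (ret, i) t = (ret ++ [t], i) := by
          rw [aStep, hIdx, hdw, List.drop_eq_nil_of_le (by omega)]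
          rfl
        have hB : bStep (posMap factors) (ret, i, ptr) t
            = (ret ++ [t], i, ptr.insert t (skipLt (pvOccs factors t) i (ptr.getD t 0))) := by
          simp only [bStep, hP]
          rw [dif_neg hk]
        rw [hA, hB]
        apply ih _ _ _ hle
        intro v m hm hmp
        by_cases hv : v = t
        · subst hv
          rw [PySem.Dict.getD_insert, if_pos rfl] at hmp
          have := hall m hm hmp
          simpa using this
        · rw [PySem.Dict.getD_insert, if_neg hv] at hmp
          exact hinv v m hm hmp

-- ===== VERDICT (by name: the statement is the Claim_ definition above) =====
theorem factors_missing_spec : Claim_equal_factors_missing := by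
  intro factors test _
  unfold Spec_factors_missing factors_missing factors_missing_alt
  exact main_inv factors test [] 0 PySem.Dict.empty (Nat.zero_le _)
    (by intro v m hm hmp; simp [PySem.Dict.getD_empty] at hmp)
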